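-- pv_equiv track=rewrite | github.com/jaenib/imbatch2soundvisu | imperf/vf_core/ingest.py | _expand_braces
-- ===== SOURCE A (Python) =====
-- from typing import Iterable, List
--
-- def _expand_braces(pattern: str) -> List[str]:
--     """Expand simple brace expressions in glob patterns.
--
--     Python's :meth:`pathlib.Path.rglob` does not understand brace expansion
--     (e.g. ``"**/*.{jpg,png}"``).  The original implementation attempted to
--     split on commas which broke patterns by dropping the surrounding text.
--     Instead we recursively expand the brace expressions so that
--     ``"**/*.{jpg,png}"`` becomes ``["**/*.jpg", "**/*.png"]``.
--
--     The implementation intentionally keeps the logic simple – nested braces are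
--     handled recursively and patterns without closing braces are returned
--     unchanged.
--     """
--
--     start = pattern.find("{")
--     if start == -1:
--         return [pattern]
--
--     end = pattern.find("}", start)
--     if end == -1:
--         # Unmatched brace – best effort by returning the original pattern.
--         return [pattern]
--
--     prefix = pattern[:start]
--     suffix = pattern[end + 1 :]
--     options = pattern[start + 1 : end].split(",")
--
--     expanded: List[str] = []
--     for option in options:
--         expanded.extend(_expand_braces(f"{prefix}{option}{suffix}"))
--     return expanded
-- ===== SOURCE B (Python) =====
-- from typing import List
--
-- def _expand_braces(pattern: str) -> List[str]:
--     """Iterative worklist over (prefix, rest) pairs: the already-expanded,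
--     brace-free prefix is carried separately so only the unprocessed tail is
--     ever re-scanned; pushing expansions in reverse keeps the recursive
--     depth-first, leftmost-brace-first output order."""
--     result: List[str] = []
--     stack = [("", pattern)]
--     while stack:
--         prefix, rest = stack.pop()
--         start = rest.find("{")
--         end = rest.find("}", start) if start != -1 else -1
--         if start == -1 or end == -1:
--             result.append(prefix + rest)
--             continue
--         new_prefix = prefix + rest[:start]
--         suffix = rest[end + 1:]
--         for option in reversed(rest[start + 1:end].split(",")):
--             stack.append((new_prefix, option + suffix))
--     return result
-- ===== Notes on version B (the rewrite author's own statement) =====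
-- stated objective: alternative
-- what changed: Replaces the recursion with an iterative worklist of (brace-free prefix, unprocessed rest) pairs, so the expanded prefix is never re-scanned; reverse pushes preserve the DFS leftmost-first output order.
import Mathlib
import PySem

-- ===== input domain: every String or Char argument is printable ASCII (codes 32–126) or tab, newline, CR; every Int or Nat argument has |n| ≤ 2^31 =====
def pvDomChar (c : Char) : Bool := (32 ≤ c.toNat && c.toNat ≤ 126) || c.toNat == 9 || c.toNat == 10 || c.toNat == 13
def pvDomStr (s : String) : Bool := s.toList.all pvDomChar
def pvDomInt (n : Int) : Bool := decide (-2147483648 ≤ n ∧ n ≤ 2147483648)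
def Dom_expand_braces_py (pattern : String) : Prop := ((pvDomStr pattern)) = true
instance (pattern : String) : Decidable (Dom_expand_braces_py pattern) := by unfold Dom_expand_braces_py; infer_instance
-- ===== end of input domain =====

-- B replaces A's recursion (which re-scans the whole rebuilt string at every
-- level) by an iterative worklist of (brace-free prefix, unprocessed rest)
-- pairs: only the tail is ever re-scanned, and expansions are pushed in
-- reverse so the DFS leftmost-first output order is preserved; equivalence is
-- proved on all strings.

-- ===== PORT A =====
-- Recursive expansion, one step per fuel unit; every recursive call is on a
-- string at least 2 characters shorter, so fuel = pattern.length makes the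
-- fuel-0 branch unreachable (proved below via expandBracesGo_eq_ebE).
def expandBracesGo : Nat → List Char → List (List Char)
  | 0, pattern => [pattern]
  | fuel+1, pattern =>
    let start := PySem.Chars.find pattern ['{']
    if start = -1 then [pattern]
    else
      let stop := PySem.Chars.findFrom pattern ['}'] start
      if stop = -1 then [pattern]
      else
        let pre := PySem.List.slice pattern none (some start)
        let suf := PySem.List.slice pattern (some (stop+1)) none
        let options := PySem.Chars.splitOn (PySem.List.slice pattern (some (start+1)) (some stop)) [',']
        options.foldl (fun acc o => acc ++ expandBracesGo fuel (pre ++ o ++ suf)) []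

def expand_braces_py (pattern : String) : List String :=
  (expandBracesGo pattern.toList.length pattern.toList).map String.ofList

-- ===== PORT B =====
-- Worklist of (prefix, rest) pairs: pop one; if rest has no matched brace
-- pair append prefix+rest to the result, else move the part of rest before
-- the '{' onto the prefix and push (new prefix, option+suffix) for each
-- option in reverse order.  fuel only makes the loop total; fuel =
-- length! + 1 exceeds the number of iterations (proved below), so the
-- fuel-0 branch is unreachable.
def expandAltLoop : Nat → List (List Char × List Char) → List (List Char) → List (List Char)
  | _, [], result => result
  | 0, _ :: _, result => result
  | fuel+1, (pfx, rest) :: stack, result =>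
    let start := PySem.Chars.find rest ['{']
    let stop := if start ≠ -1 then PySem.Chars.findFrom rest ['}'] start else -1
    if start = -1 ∨ stop = -1 then
      expandAltLoop fuel stack (result ++ [pfx ++ rest])
    else
      let newPfx := pfx ++ PySem.List.slice rest none (some start)
      let suffix := PySem.List.slice rest (some (stop+1)) none
      let options := PySem.Chars.splitOn (PySem.List.slice rest (some (start+1)) (some stop)) [',']
      expandAltLoop fuel (options.reverse.foldl (fun st o => (newPfx, o ++ suffix) :: st) stack) result

def expand_braces_py_alt (pattern : String) : List String :=
  (expandAltLoop (Nat.factorial pattern.toList.length + 1) [([], pattern.toList)] []).map String.ofList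

-- ===== PRECONDITION & SPEC =====
def Spec_expand_braces_py (pattern : String) (out : List String) : Prop := out = expand_braces_py_alt pattern
instance (pattern : String) (out : List String) : Decidable (Spec_expand_braces_py pattern out) := by unfold Spec_expand_braces_py; infer_instance

-- ===== CLAIM (what is proved, stated in full; the proofs are below) =====
def Claim_equal_expand_braces_py : Prop := ∀ (pattern : String), Dom_expand_braces_py pattern → Spec_expand_braces_py pattern (expand_braces_py pattern)

-- ===== LEMMAS AND PROOFS =====

-- Each piece produced by splitOn is no longer than the input.
theorem splitOn_go_length_le (sep : List Char) (fuel : Nat) :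
    ∀ (l cur : List Char) (acc : List (List Char)) (o : List Char),
      o ∈ PySem.Chars.splitOn.go sep fuel l cur acc →
      o ∈ acc ∨ o.length ≤ cur.length + l.length := by
  induction fuel with
  | zero =>
    intro l cur acc o h
    simp [PySem.Chars.splitOn.go] at h
    rcases h with h | h
    · left; exact h
    · right; simp [h]
  | succ fuel ih =>
    intro l cur acc o h
    cases l with
    | nil =>
      simp [PySem.Chars.splitOn.go] at h
      rcases h with h | h
      · left; exact h
      · right; simp [h]
    | cons c rest =>
      rw [PySem.Chars.splitOn.go] at h
      split at h
      next hpre =>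
        rcases ih _ _ _ _ h with h' | h'
        · rcases List.mem_cons.mp h' with h'' | h''
          · right; simp [h'']
          · left; exact h''
        · right
          have hle : sep.length ≤ (c :: rest).length :=
            (List.isPrefixOf_iff_prefix.mp hpre).length_le
          simp at h' hle ⊢
          omega
      · rcases ih _ _ _ _ h with h' | h'
        · left; exact h'
        · right; simp at h' ⊢; omega

theorem mem_splitOn_length_le (s sep o : List Char) (h : o ∈ PySem.Chars.splitOn s sep) :
    o.length ≤ s.length := by
  have := splitOn_go_length_le sep (s.length + 1) s [] [] o h
  simpa using this

-- splitOn produces at most length + 1 pieces.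
theorem splitOn_go_count_le (sep : List Char) (hsep : sep ≠ []) (fuel : Nat) :
    ∀ (l cur : List Char) (acc : List (List Char)),
      (PySem.Chars.splitOn.go sep fuel l cur acc).length ≤ acc.length + l.length + 1 := by
  induction fuel with
  | zero => intro l cur acc; simp [PySem.Chars.splitOn.go]
  | succ fuel ih =>
    intro l cur acc
    cases l with
    | nil => simp [PySem.Chars.splitOn.go]
    | cons c rest =>
      rw [PySem.Chars.splitOn.go]
      split
      next hpre =>
        have hle : sep.length ≤ (c :: rest).length :=
          (List.isPrefixOf_iff_prefix.mp hpre).length_le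
        have hpos : 0 < sep.length := List.length_pos_iff.mpr hsep
        have := ih (List.drop sep.length (c :: rest)) [] (cur.reverse :: acc)
        simp at this hle ⊢
        omega
      · have := ih rest (c :: cur) acc
        simp at this ⊢
        omega

theorem splitOn_length_le (s sep : List Char) (hsep : sep ≠ []) :
    (PySem.Chars.splitOn s sep).length ≤ s.length + 1 := by
  have := splitOn_go_count_le sep hsep (s.length + 1) s [] []
  simpa using this

-- Facts about the first '{' / the first '}' after it.
theorem brace_facts (p : List Char)
    (hs : PySem.Chars.find p ['{'] ≠ -1)
    (he : PySem.Chars.findFrom p ['}'] (PySem.Chars.find p ['{']) ≠ -1) :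
    (PySem.Chars.find p ['{']).toNat < (PySem.Chars.findFrom p ['}'] (PySem.Chars.find p ['{'])).toNat ∧
    (PySem.Chars.findFrom p ['}'] (PySem.Chars.find p ['{'])).toNat < p.length ∧
    0 ≤ PySem.Chars.find p ['{'] ∧
    0 ≤ PySem.Chars.findFrom p ['}'] (PySem.Chars.find p ['{']) := by
  have h0 : -1 ≤ PySem.Chars.find p ['{'] := PySem.Chars.neg_one_le_find p _
  have hs0 : 0 ≤ PySem.Chars.find p ['{'] := by omega
  have hkeq : PySem.Chars.find p ['{'] = ((PySem.Chars.find p ['{']).toNat : Int) :=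
    (Int.toNat_of_nonneg hs0).symm
  have hklen : (PySem.Chars.find p ['{']).toNat ≤ p.length := by
    have := PySem.Chars.find_le_length p ['{']
    omega
  have hfs := PySem.Chars.find_spec (s := p) (sub := ['{']) hs0
  rw [hkeq] at he
  have hspec := PySem.Chars.findFrom_natCast_spec p ['}'] (PySem.Chars.find p ['{']).toNat hklen he
  obtain ⟨hke, hpr, -⟩ := hspec
  rw [← hkeq] at hke hpr
  have he0 : 0 ≤ PySem.Chars.findFrom p ['}'] (PySem.Chars.find p ['{']) := by omega
  have helen : (PySem.Chars.findFrom p ['}'] (PySem.Chars.find p ['{'])).toNat < p.length := by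
    have := hpr.length_le
    simp at this
    omega
  have hne : (PySem.Chars.find p ['{']).toNat ≠ (PySem.Chars.findFrom p ['}'] (PySem.Chars.find p ['{'])).toNat := by
    intro heq
    have h1 := hfs.1
    rw [heq] at h1
    obtain ⟨t1, ht1⟩ := h1
    obtain ⟨t2, ht2⟩ := hpr
    rw [← ht2] at ht1
    simp at ht1
  refine ⟨by omega, helen, hs0, he0⟩

-- Proof-only abbreviations.
def ebE (p : List Char) : List (List Char) := expandBracesGo p.length p

def ebChildren (p : List Char) : List (List Char) :=
  (PySem.Chars.splitOn
      (PySem.List.slice p (some (PySem.Chars.find p ['{'] + 1))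
        (some (PySem.Chars.findFrom p ['}'] (PySem.Chars.find p ['{'])))) [',']).map
    (fun o =>
      PySem.List.slice p none (some (PySem.Chars.find p ['{'])) ++ o ++
        PySem.List.slice p (some (PySem.Chars.findFrom p ['}'] (PySem.Chars.find p ['{']) + 1)) none)

def ebM (st : List (List Char)) : Nat := (st.map (fun p => p.length.factorial)).sum

def ebM2 (st : List (List Char × List Char)) : Nat := (st.map (fun pr => pr.2.length.factorial)).sum

theorem expandBracesGo_no_brace (f : Nat) (p : List Char)
    (h : PySem.Chars.find p ['{'] = -1 ∨
         (PySem.Chars.find p ['{'] ≠ -1 ∧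
          PySem.Chars.findFrom p ['}'] (PySem.Chars.find p ['{']) = -1)) :
    expandBracesGo f p = [p] := by
  cases f with
  | zero => rfl
  | succ f =>
    rw [expandBracesGo]
    rcases h with h | ⟨h1, h2⟩
    · simp [h]
    · simp [h1, h2]

theorem child_len (p o : List Char) (s e : Int) (hs0 : 0 ≤ s) (he0 : 0 ≤ e)
    (hse : s.toNat < e.toNat) (hel : e.toNat < p.length)
    (ho : o ∈ PySem.Chars.splitOn (PySem.List.slice p (some (s+1)) (some e)) [',']) :
    (PySem.List.slice p none (some s) ++ o ++ PySem.List.slice p (some (e+1)) none).length + 2 ≤ p.length := by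
  have h1 : o.length ≤ (PySem.List.slice p (some (s+1)) (some e)).length :=
    mem_splitOn_length_le _ _ _ ho
  rw [PySem.List.slice_toNat p (by omega) he0] at h1
  rw [PySem.List.slice_to p hs0, PySem.List.slice_from p (by omega : (0:Int) ≤ e + 1)]
  simp at h1 ⊢
  omega

theorem ebChildren_len (p : List Char)
    (hs : PySem.Chars.find p ['{'] ≠ -1)
    (he : PySem.Chars.findFrom p ['}'] (PySem.Chars.find p ['{']) ≠ -1) :
    ∀ c ∈ ebChildren p, c.length + 2 ≤ p.length := by
  obtain ⟨hse, hel, hs0, he0⟩ := brace_facts p hs he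
  intro c hc
  simp only [ebChildren, List.mem_map] at hc
  obtain ⟨o, ho, rfl⟩ := hc
  exact child_len p o _ _ hs0 he0 hse hel ho

theorem ebChildren_count (p : List Char)
    (hs : PySem.Chars.find p ['{'] ≠ -1)
    (he : PySem.Chars.findFrom p ['}'] (PySem.Chars.find p ['{']) ≠ -1) :
    (ebChildren p).length + 1 ≤ p.length := by
  obtain ⟨hse, hel, hs0, he0⟩ := brace_facts p hs he
  have h1 := splitOn_length_le
    (PySem.List.slice p (some (PySem.Chars.find p ['{'] + 1))
      (some (PySem.Chars.findFrom p ['}'] (PySem.Chars.find p ['{'])))) [','] (by simp)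
  have h2 : (PySem.List.slice p (some (PySem.Chars.find p ['{'] + 1))
      (some (PySem.Chars.findFrom p ['}'] (PySem.Chars.find p ['{'])))).length + 1 +
      (PySem.Chars.find p ['{']).toNat <
      (PySem.Chars.findFrom p ['}'] (PySem.Chars.find p ['{'])).toNat + 1 := by
    rw [PySem.List.slice_toNat p (by omega) he0]
    simp
    omega
  simp only [ebChildren, List.length_map]
  omega

theorem flatMap_map_eq {α β γ : Type} (f : α → β) (g : β → List γ) (l : List α) :
    (l.map f).flatMap g = l.flatMap (fun x => g (f x)) := by
  induction l with
  | nil => rfl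
  | cons a t ih => simp [ih]

theorem flatMap_congr_mem {α β : Type} (l : List α) (f g : α → List β)
    (h : ∀ x ∈ l, f x = g x) : l.flatMap f = l.flatMap g := by
  induction l with
  | nil => rfl
  | cons a t ih =>
    simp only [List.flatMap_cons]
    rw [h a (by simp), ih (fun x hx => h x (by simp [hx]))]

-- One unfolding of the recursion in the brace case, phrased through ebChildren.
theorem go_unfold_brace (f : Nat) (p : List Char)
    (hs : ¬ PySem.Chars.find p ['{'] = -1)
    (he : ¬ PySem.Chars.findFrom p ['}'] (PySem.Chars.find p ['{']) = -1) :
    expandBracesGo (f+1) p = (ebChildren p).flatMap (expandBracesGo f) := by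
  simp only [expandBracesGo, if_neg hs, if_neg he]
  rw [PySem.List.foldl_append_eq_flatMap, ebChildren, flatMap_map_eq]
  simp

theorem foldl_cons_eq_append {α β : Type} (f : α → β) (l : List α) (st : List β) :
    l.foldl (fun s o => f o :: s) st = (l.map f).reverse ++ st := by
  induction l generalizing st with
  | nil => simp
  | cons a t ih => simp [List.foldl_cons, ih]

theorem reverse_foldl_cons_eq_append {α β : Type} (f : α → β) (l : List α) (st : List β) :
    l.reverse.foldl (fun s o => f o :: s) st = l.map f ++ st := by
  rw [foldl_cons_eq_append]
  simp

-- The recursion's value does not depend on the fuel once it dominates the length.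
theorem expandBracesGo_eq_ebE (fuel : Nat) :
    ∀ p : List Char, p.length ≤ fuel → expandBracesGo fuel p = ebE p := by
  induction fuel using Nat.strong_induction_on with
  | _ fuel ih =>
    intro p hp
    by_cases hs : PySem.Chars.find p ['{'] = -1
    · rw [expandBracesGo_no_brace _ _ (Or.inl hs), ebE,
        expandBracesGo_no_brace _ _ (Or.inl hs)]
    by_cases he : PySem.Chars.findFrom p ['}'] (PySem.Chars.find p ['{']) = -1
    · rw [expandBracesGo_no_brace _ _ (Or.inr ⟨hs, he⟩), ebE,
        expandBracesGo_no_brace _ _ (Or.inr ⟨hs, he⟩)]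
    obtain ⟨hse, hel, -, -⟩ := brace_facts p hs he
    have hlen2 : 2 ≤ p.length := by omega
    obtain ⟨f, rfl⟩ : ∃ f, fuel = f + 1 := ⟨fuel - 1, by omega⟩
    obtain ⟨m, hm⟩ : ∃ m, p.length = m + 1 := ⟨p.length - 1, by omega⟩
    rw [ebE, hm, go_unfold_brace f p hs he, go_unfold_brace m p hs he]
    apply flatMap_congr_mem
    intro c hc
    have hc2 := ebChildren_len p hs he c hc
    rw [ih f (by omega) c (by omega), ih m (by omega) c (by omega)]

theorem factorial_lt_succ (n : Nat) (hn : 0 < n) : n.factorial < (n+1).factorial := by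
  rw [Nat.factorial_succ]
  have hp := Nat.factorial_pos n
  calc n.factorial < 2 * n.factorial := by omega
    _ ≤ (n+1) * n.factorial := Nat.mul_le_mul_right _ (by omega)

theorem ebM_children (p : List Char)
    (hs : PySem.Chars.find p ['{'] ≠ -1)
    (he : PySem.Chars.findFrom p ['}'] (PySem.Chars.find p ['{']) ≠ -1) :
    ebM (ebChildren p) < p.length.factorial := by
  obtain ⟨hse, hel, -, -⟩ := brace_facts p hs he
  obtain ⟨k, hk⟩ : ∃ k, p.length = k + 2 := ⟨p.length - 2, by omega⟩
  have hb : ∀ x ∈ (ebChildren p).map (fun c => c.length.factorial), x ≤ k.factorial := by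
    intro x hx
    simp only [List.mem_map] at hx
    obtain ⟨c, hc, rfl⟩ := hx
    have := ebChildren_len p hs he c hc
    exact Nat.factorial_le (by omega)
  have hsum := List.sum_le_card_nsmul _ _ hb
  simp only [List.length_map, smul_eq_mul] at hsum
  have hcount := ebChildren_count p hs he
  calc ebM (ebChildren p) ≤ (ebChildren p).length * k.factorial := hsum
    _ ≤ (k+1) * k.factorial := Nat.mul_le_mul_right _ (by omega)
    _ = (k+1).factorial := (Nat.factorial_succ k).symm
    _ < (k+2).factorial := factorial_lt_succ (k+1) (by omega)
    _ = p.length.factorial := by rw [hk]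

theorem ebE_eq_flatten (p : List Char)
    (hs : ¬ PySem.Chars.find p ['{'] = -1)
    (he : ¬ PySem.Chars.findFrom p ['}'] (PySem.Chars.find p ['{']) = -1) :
    ebE p = (ebChildren p).flatMap ebE := by
  obtain ⟨hse, hel, -, -⟩ := brace_facts p hs he
  obtain ⟨m, hm⟩ : ∃ m, p.length = m + 1 := ⟨p.length - 1, by omega⟩
  rw [ebE, hm, go_unfold_brace m p hs he]
  apply flatMap_congr_mem
  intro c hc
  have hc2 := ebChildren_len p hs he c hc
  exact expandBracesGo_eq_ebE m c (by omega)

-- ---- prefix-shift lemmas: finding a character in pre ++ rest when pre does not contain it ----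

theorem singleton_prefix_head? (c : Char) (t : List Char) : [c] <+: t ↔ t.head? = some c := by
  cases t with
  | nil => simp
  | cons a u => simp [List.cons_prefix_cons, eq_comm]

theorem prefix_drop_iff (c : Char) (l : List Char) (k : Nat) :
    [c] <+: l.drop k ↔ l[k]? = some c := by
  rw [singleton_prefix_head?, List.head?_drop]

theorem singleton_infix_mem (c : Char) (l : List Char) : [c] <:+: l ↔ c ∈ l := by
  constructor
  · intro h; exact h.subset (by simp)
  · intro h
    obtain ⟨s, t, rfl⟩ := List.append_of_mem h
    exact ⟨s, t, by simp⟩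

theorem drop_append_add {α : Type} (pre l : List α) (k : Nat) :
    (pre ++ l).drop (pre.length + k) = l.drop k := by
  induction pre with
  | nil => simp
  | cons a t ih => simp [Nat.succ_add, ih]

theorem take_append_add {α : Type} (pre l : List α) (k : Nat) :
    (pre ++ l).take (pre.length + k) = pre ++ l.take k := by
  induction pre with
  | nil => simp
  | cons a t ih => simpa [Nat.succ_add] using ih

theorem find_append_single (c : Char) (pre rest : List Char) (h : c ∉ pre) :
    PySem.Chars.find (pre ++ rest) [c] =
      if PySem.Chars.find rest [c] = -1 then (-1 : Int)
      else (pre.length : Int) + PySem.Chars.find rest [c] := by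
  by_cases hr : PySem.Chars.find rest [c] = -1
  · rw [if_pos hr, PySem.Chars.find_eq_neg_one_iff, singleton_infix_mem]
    have h1 : c ∉ rest := by
      have := (PySem.Chars.find_eq_neg_one_iff rest [c]).mp hr
      rw [singleton_infix_mem] at this
      exact this
    simp [h, h1]
  · rw [if_neg hr]
    have h0 : 0 ≤ PySem.Chars.find rest [c] := by
      have := PySem.Chars.neg_one_le_find rest [c]; omega
    have hspec := PySem.Chars.find_spec (s := rest) (sub := [c]) h0
    have hocc : (pre ++ rest)[pre.length + (PySem.Chars.find rest [c]).toNat]? = some c := by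
      rw [List.getElem?_append_right (by omega)]
      have := (prefix_drop_iff c rest _).mp hspec.1
      simpa using this
    have hmemr : c ∈ rest := by
      have := (prefix_drop_iff c rest _).mp hspec.1
      exact List.mem_of_getElem? this
    have hv0 : 0 ≤ PySem.Chars.find (pre ++ rest) [c] := by
      rw [PySem.Chars.find_nonneg_iff, singleton_infix_mem]
      simp [hmemr]
    have hvspec := PySem.Chars.find_spec (s := pre ++ rest) (sub := [c]) hv0
    have hvle : (PySem.Chars.find (pre ++ rest) [c]).toNat ≤
        pre.length + (PySem.Chars.find rest [c]).toNat := by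
      by_contra hlt
      exact hvspec.2 _ (by omega) ((prefix_drop_iff c _ _).mpr hocc)
    have hvge : ¬ (PySem.Chars.find (pre ++ rest) [c]).toNat <
        pre.length + (PySem.Chars.find rest [c]).toNat := by
      intro hlt
      have hvget := (prefix_drop_iff c _ _).mp hvspec.1
      by_cases hc : (PySem.Chars.find (pre ++ rest) [c]).toNat < pre.length
      · rw [List.getElem?_append_left hc] at hvget
        exact h (List.mem_of_getElem? hvget)
      · rw [List.getElem?_append_right (by omega)] at hvget
        exact hspec.2 _ (by omega) ((prefix_drop_iff c rest _).mpr hvget)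
    have : (PySem.Chars.find (pre ++ rest) [c]).toNat =
        pre.length + (PySem.Chars.find rest [c]).toNat := by omega
    omega

theorem findFrom_shift (c : Char) (pre rest : List Char) (k : Nat) (hk : k ≤ rest.length) :
    PySem.Chars.findFrom (pre ++ rest) [c] ((pre.length + k : Nat) : Int) =
      if PySem.Chars.findFrom rest [c] ((k : Nat) : Int) = -1 then (-1 : Int)
      else (pre.length : Int) + PySem.Chars.findFrom rest [c] ((k : Nat) : Int) := by
  rw [PySem.Chars.findFrom_natCast _ _ _ (by simp; omega),
      PySem.Chars.findFrom_natCast _ _ _ hk, drop_append_add]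
  by_cases hf : PySem.Chars.find (rest.drop k) [c] = -1
  · simp [hf]
  · have h0 : 0 ≤ PySem.Chars.find (rest.drop k) [c] := by
      have := PySem.Chars.neg_one_le_find (rest.drop k) [c]; omega
    simp only [if_neg hf]
    rw [if_neg (by omega)]
    push_cast; ring

-- the part of rest before its first '{' contains no '{'
theorem no_brace_take_find (rest : List Char)
    (hs : PySem.Chars.find rest ['{'] ≠ -1) :
    '{' ∉ rest.take (PySem.Chars.find rest ['{']).toNat := by
  have h0 : 0 ≤ PySem.Chars.find rest ['{'] := by
    have := PySem.Chars.neg_one_le_find rest ['{']; omega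
  have hspec := PySem.Chars.find_spec (s := rest) (sub := ['{']) h0
  intro hmem
  obtain ⟨j, hjlt, hj⟩ := List.getElem_of_mem hmem
  rw [List.getElem_take] at hj
  simp at hjlt
  exact hspec.2 j (by omega)
    ((prefix_drop_iff _ rest j).mpr (by rw [List.getElem?_eq_getElem (by omega)]; simp [hj]))

-- FACTORING: a '{'-free prefix passes through the expansion unchanged.
theorem ebE_factor (pre : List Char) (hpre : '{' ∉ pre) :
    ∀ (n : Nat) (rest : List Char), rest.length ≤ n →
      ebE (pre ++ rest) = (ebE rest).map (fun r => pre ++ r) := by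
  intro n
  induction n using Nat.strong_induction_on with
  | _ n ih =>
    intro rest hn
    have hfind := find_append_single '{' pre rest hpre
    by_cases hs : PySem.Chars.find rest ['{'] = -1
    · rw [if_pos hs] at hfind
      rw [ebE, expandBracesGo_no_brace _ _ (Or.inl hfind),
          ebE, expandBracesGo_no_brace _ _ (Or.inl hs)]
      rfl
    · rw [if_neg hs] at hfind
      have hi0 : 0 ≤ PySem.Chars.find rest ['{'] := by
        have := PySem.Chars.neg_one_le_find rest ['{']; omega
      obtain ⟨I, hI⟩ : ∃ I : Nat, PySem.Chars.find rest ['{'] = (I : Int) :=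
        ⟨_, (Int.toNat_of_nonneg hi0).symm⟩
      have hilen : I ≤ rest.length := by
        have := PySem.Chars.find_le_length rest ['{']; omega
      have hfind2 : PySem.Chars.find (pre ++ rest) ['{'] =
          ((pre.length + I : Nat) : Int) := by
        rw [hfind, hI]; push_cast; ring
      have hshift := findFrom_shift '}' pre rest I hilen
      rw [← hI] at hshift
      by_cases he : PySem.Chars.findFrom rest ['}'] (PySem.Chars.find rest ['{']) = -1
      · rw [if_pos he] at hshift
        rw [ebE, expandBracesGo_no_brace _ _ (Or.inr ⟨by rw [hfind2]; omega, by rw [hfind2]; exact hshift⟩),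
            ebE, expandBracesGo_no_brace _ _ (Or.inr ⟨hs, he⟩)]
        rfl
      · rw [if_neg he] at hshift
        have hj0 : 0 ≤ PySem.Chars.findFrom rest ['}'] (PySem.Chars.find rest ['{']) := by
          obtain ⟨-, -, -, h⟩ := brace_facts rest hs he; exact h
        obtain ⟨J, hJ⟩ : ∃ J : Nat,
            PySem.Chars.findFrom rest ['}'] (PySem.Chars.find rest ['{']) = (J : Int) :=
          ⟨_, (Int.toNat_of_nonneg hj0).symm⟩
        have hshift2 : PySem.Chars.findFrom (pre ++ rest) ['}']
            (((pre.length + I : Nat) : Int)) = ((pre.length + J : Nat) : Int) := by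
          rw [hshift, hJ]; push_cast; ring
        obtain ⟨hse, hel, -, -⟩ := brace_facts rest hs he
        rw [hJ] at hse hel; rw [hI] at hse
        simp only [Int.toNat_natCast] at hse hel
        have hs2 : PySem.Chars.find (pre ++ rest) ['{'] ≠ -1 := by
          rw [hfind2]; omega
        have he2 : PySem.Chars.findFrom (pre ++ rest) ['}']
            (PySem.Chars.find (pre ++ rest) ['{']) ≠ -1 := by
          rw [hfind2, hshift2]; omega
        rw [ebE_eq_flatten _ hs2 he2, ebE_eq_flatten _ hs he]
        -- the children of pre ++ rest are pre ++ (children of rest)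
        have hch : ebChildren (pre ++ rest) = (ebChildren rest).map (fun c => pre ++ c) := by
          unfold ebChildren
          rw [hfind2, hshift2, hJ, hI]
          have e1 : PySem.List.slice (pre ++ rest) none (some ((pre.length + I : Nat) : Int)) =
              pre ++ PySem.List.slice rest none (some ((I : Nat) : Int)) := by
            rw [PySem.List.slice_to_natCast, PySem.List.slice_to_natCast, take_append_add]
          have e2 : PySem.List.slice (pre ++ rest)
              (some (((pre.length + J : Nat) : Int) + 1)) none =
              PySem.List.slice rest (some (((J : Nat) : Int) + 1)) none := by
            rw [show (((pre.length + J : Nat) : Int) + 1) = ((pre.length + (J + 1) : Nat) : Int) by push_cast; ring,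
                show (((J : Nat) : Int) + 1) = (((J + 1 : Nat)) : Int) by push_cast; ring,
                PySem.List.slice_from_natCast, PySem.List.slice_from_natCast, drop_append_add]
          have e3 : PySem.List.slice (pre ++ rest)
              (some (((pre.length + I : Nat) : Int) + 1)) (some ((pre.length + J : Nat) : Int)) =
              PySem.List.slice rest (some (((I : Nat) : Int) + 1)) (some ((J : Nat) : Int)) := by
            rw [show (((pre.length + I : Nat) : Int) + 1) = ((pre.length + (I + 1) : Nat) : Int) by push_cast; ring,
                show (((I : Nat) : Int) + 1) = (((I + 1 : Nat)) : Int) by push_cast; ring,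
                PySem.List.slice_natCast, PySem.List.slice_natCast, drop_append_add]
            congr 1
            omega
          rw [e1, e2, e3]
          simp only [List.map_map]
          apply List.map_congr_left
          intro o ho
          simp [Function.comp, List.append_assoc]
        rw [hch, flatMap_map_eq]
        have hstep : ∀ c ∈ ebChildren rest, ebE (pre ++ c) = (ebE c).map (fun r => pre ++ r) := by
          intro c hc
          have hlen := ebChildren_len rest hs he c hc
          have hlt : c.length < n := by omega
          exact ih c.length hlt c (le_refl _)
        rw [flatMap_congr_mem _ _ (fun c => (ebE c).map (fun r => pre ++ r)) hstep]
        rw [List.map_flatMap]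

theorem mem_slice_take_no_brace (rest : List Char)
    (hs : PySem.Chars.find rest ['{'] ≠ -1) :
    '{' ∉ PySem.List.slice rest none (some (PySem.Chars.find rest ['{'])) := by
  have hi0 : 0 ≤ PySem.Chars.find rest ['{'] := by
    have := PySem.Chars.neg_one_le_find rest ['{']; omega
  rw [PySem.List.slice_to _ hi0]
  exact no_brace_take_find rest hs

theorem ebM2_append (a b : List (List Char × List Char)) : ebM2 (a ++ b) = ebM2 a + ebM2 b := by
  simp [ebM2]

-- The worklist loop computes the recursion's output, given enough fuel.
theorem expandAltLoop_spec (fuel : Nat) :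
    ∀ (st : List (List Char × List Char)) (res : List (List Char)), ebM2 st < fuel →
      expandAltLoop fuel st res =
        res ++ (st.map (fun pr => (ebE pr.2).map (fun r => pr.1 ++ r))).flatten := by
  induction fuel with
  | zero => intro st res h; omega
  | succ fuel ih =>
    intro st res h
    match st with
    | [] => simp [expandAltLoop]
    | (pfx, rest) :: stack =>
      have hpos : 0 < rest.length.factorial := Nat.factorial_pos rest.length
      have hM : ebM2 ((pfx, rest) :: stack) = rest.length.factorial + ebM2 stack := by
        simp [ebM2]
      rw [hM] at h
      by_cases hs : PySem.Chars.find rest ['{'] = -1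
      · simp only [expandAltLoop, hs]
        rw [if_pos (by simp)]
        rw [ih stack (res ++ [pfx ++ rest]) (by omega)]
        have hE : ebE rest = [rest] := expandBracesGo_no_brace _ _ (Or.inl hs)
        simp [hE]
      · by_cases he : PySem.Chars.findFrom rest ['}'] (PySem.Chars.find rest ['{']) = -1
        · simp only [expandAltLoop]
          rw [if_pos (show PySem.Chars.find rest ['{'] ≠ -1 from hs)]
          rw [if_pos (Or.inr he)]
          rw [ih stack (res ++ [pfx ++ rest]) (by omega)]
          have hE : ebE rest = [rest] := expandBracesGo_no_brace _ _ (Or.inr ⟨hs, he⟩)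
          simp [hE]
        · simp only [expandAltLoop]
          rw [if_pos (show PySem.Chars.find rest ['{'] ≠ -1 from hs)]
          rw [if_neg (by simp [hs, he])]
          rw [reverse_foldl_cons_eq_append]
          set preR := PySem.List.slice rest none (some (PySem.Chars.find rest ['{'])) with hpreR
          set sufR := PySem.List.slice rest
            (some (PySem.Chars.findFrom rest ['}'] (PySem.Chars.find rest ['{']) + 1)) none with hsufR
          set options := PySem.Chars.splitOn
            (PySem.List.slice rest (some (PySem.Chars.find rest ['{'] + 1))
              (some (PySem.Chars.findFrom rest ['}'] (PySem.Chars.find rest ['{'])))) [','] with hopts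
          -- the pushed pairs
          have hkids : ∀ o ∈ options, (o ++ sufR).length + 2 ≤ rest.length := by
            intro o ho
            have := ebChildren_len rest hs he (preR ++ o ++ sufR) (by
              simp only [ebChildren, List.mem_map]
              exact ⟨o, ho, rfl⟩)
            have h2 : (o ++ sufR).length ≤ (preR ++ o ++ sufR).length := by
              simp only [List.length_append]; omega
            omega
          have hmeas : ebM2 (options.map (fun o => (pfx ++ preR, o ++ sufR))) <
              rest.length.factorial := by
            have hle : ebM2 (options.map (fun o => (pfx ++ preR, o ++ sufR))) ≤
                ebM (ebChildren rest) := by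
              unfold ebM2 ebM
              rw [ebChildren]
              simp only [List.map_map]
              apply List.sum_le_sum
              intro o ho
              simp only [Function.comp]
              exact Nat.factorial_le (by rw [hsufR]; simp only [List.length_append]; omega)
            have := ebM_children rest hs he
            omega
          rw [ih _ res (by rw [ebM2_append]; omega)]
          congr 1
          -- remains: flatten of children entries ++ stack entries = entry for (pfx,rest) ++ stack entries
          rw [List.map_append, List.flatten_append]
          simp only [List.map_cons, List.flatten_cons]
          congr 1
          rw [ebE_eq_flatten rest hs he, ebChildren]
          rw [← hpreR, ← hsufR, ← hopts]
          rw [flatMap_map_eq]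
          symm
          have hfac : ∀ o ∈ options, ebE (preR ++ (o ++ sufR)) =
              (ebE (o ++ sufR)).map (fun r => preR ++ r) := by
            intro o ho
            exact ebE_factor preR (mem_slice_take_no_brace rest hs) (o ++ sufR).length
              (o ++ sufR) (le_refl _)
          calc ((options.flatMap fun o => ebE (preR ++ o ++ sufR)).map fun r => pfx ++ r)
              = ((options.flatMap fun o => (ebE (o ++ sufR)).map (fun r => preR ++ r)).map
                  fun r => pfx ++ r) := by
                congr 1
                apply flatMap_congr_mem
                intro o ho
                rw [List.append_assoc]
                exact hfac o ho
            _ = (options.map (fun o => (pfx ++ preR, o ++ sufR))).flatMap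
                  (fun pr => (ebE pr.2).map (fun r => pr.1 ++ r)) := by
                rw [flatMap_map_eq, List.map_flatMap]
                apply flatMap_congr_mem
                intro o ho
                simp [List.map_map, Function.comp, List.append_assoc]
            _ = ((options.map fun o => (pfx ++ preR, o ++ sufR)).map
                  fun pr => (ebE pr.2).map fun r => pr.1 ++ r).flatten := by
                rw [List.flatMap_def]

-- ===== VERDICT (by name: the statement is the Claim_ definition above) =====
theorem expand_braces_py_spec : Claim_equal_expand_braces_py := by
  intro pattern _
  unfold Spec_expand_braces_py expand_braces_py expand_braces_py_alt
  rw [expandAltLoop_spec _ _ _ (by simp [ebM2])]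
  simp [ebE]
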